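-- pv_equiv track=rewrite | github.com/STOCKFISh07/Brance_model | assignment.py | split_documents_into_passages
-- ===== SOURCE A (Python) =====
-- from typing import List, Optional
--
-- def split_document_text(text: str, n=100, character=" ") -> List[str]:
--     """Split the text every ``n``-th occurrence of ``character``"""
--     text_parts = text.split(character)
--     return [character.join(text_parts[i : i + n]).strip() for i in range(0, len(text_parts), n)]
--
-- def split_documents_into_passages(documents: dict) -> dict:
--     """Split documents into passages"""
--     passage_titles, passage_texts = [], []
--     for title, text in zip(documents["title"], documents["text"]):
--         if text is not None:
--             for passage in split_document_text(text):
--                 passage_titles.append(title if title is not None else "")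
--                 passage_texts.append(passage)
--     return {"passage_title": passage_titles, "passage_text": passage_texts}
-- ===== SOURCE B (Python) =====
-- def split_documents_into_passages(documents: dict) -> dict:
--     """Split documents into passages by a single left-to-right scan over each text
--     (no split-into-parts-then-regroup): every 100th space closes a passage."""
--     passage_titles, passage_texts = [], []
--     for title, text in zip(documents["title"], documents["text"]):
--         if text is None:
--             continue
--         t = title if title is not None else ""
--         cur = []
--         count = 0
--         for ch in text:
--             if ch == " ":
--                 count += 1
--                 if count % 100 == 0:
--                     passage_titles.append(t)
--                     passage_texts.append("".join(cur).strip())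
--                     cur = []
--                 else:
--                     cur.append(ch)
--             else:
--                 cur.append(ch)
--         passage_titles.append(t)
--         passage_texts.append("".join(cur).strip())
--     return {"passage_title": passage_titles, "passage_text": passage_texts}
-- ===== Notes on version B (the rewrite author's own statement) =====
-- stated objective: alternative
-- what changed: A splits each text into all space-separated parts and regroups them with an index-stepping slice-and-join comprehension; B never builds the parts list at all and instead makes a single left-to-right character scan per text, closing a passage at every 100th space and flushing the remainder.
import Mathlib
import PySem

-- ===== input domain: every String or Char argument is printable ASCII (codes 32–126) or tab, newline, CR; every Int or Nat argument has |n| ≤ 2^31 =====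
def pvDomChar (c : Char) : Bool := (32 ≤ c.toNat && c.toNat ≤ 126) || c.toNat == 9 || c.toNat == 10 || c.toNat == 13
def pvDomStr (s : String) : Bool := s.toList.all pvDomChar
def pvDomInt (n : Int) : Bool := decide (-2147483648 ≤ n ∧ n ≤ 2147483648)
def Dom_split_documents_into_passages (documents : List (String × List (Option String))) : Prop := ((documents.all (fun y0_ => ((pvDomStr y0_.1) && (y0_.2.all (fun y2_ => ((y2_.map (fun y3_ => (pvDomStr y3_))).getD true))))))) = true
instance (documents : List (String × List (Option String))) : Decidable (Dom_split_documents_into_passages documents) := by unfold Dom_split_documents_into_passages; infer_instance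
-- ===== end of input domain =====

-- B replaces A's split-all-parts-then-regroup-by-slices logic with a single left-to-right
-- character scan per text that closes a passage at every 100th space (objective: alternative).
-- Equivalence is about the RETURN value; neither program mutates its argument.

-- ===== PORT A =====
-- split_document_text(text, n=100, character=" ")
def split_document_text (text : String) (n : Int) (character : String) : List String :=
  let text_parts : List (List Char) := PySem.Chars.splitOn text.toList character.toList
  (PySem.List.pyRange 0 (text_parts.length : Int) n).map (fun i =>
    String.ofList (PySem.Chars.strip (PySem.Chars.join character.toList
      (PySem.List.slice text_parts (some i) (some (i + n))))))

def split_documents_into_passages (documents : List (String × List (Option String))) : List (String × List String) :=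
  -- documents["title"], documents["text"]: first-match lookup; Pre_ excludes the KeyError case
  match (documents.find? (fun p => p.1 == "title")).map (·.2),
        (documents.find? (fun p => p.1 == "text")).map (·.2) with
  | some titles, some texts =>
      let st := (titles.zip texts).foldl (fun (acc : List String × List String) tt =>
          match tt.2 with
          | none => acc
          | some text => (split_document_text text 100 " ").foldl
              (fun acc2 passage => (acc2.1 ++ [tt.1.getD ""], acc2.2 ++ [passage])) acc)
        (([] : List String), ([] : List String))
      [("passage_title", st.1), ("passage_text", st.2)]
  | _, _ => []

-- ===== PORT B =====
-- one step of B's inner character scan: state ((cur, count), (passage_titles, passage_texts))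
def pvBStep (t : String) (s : (List Char × Int) × List String × List String) (ch : Char) :
    (List Char × Int) × List String × List String :=
  if ch = ' ' then
    let c := s.1.2 + 1
    if PySem.Int.mod c 100 == 0 then
      (([], c), s.2.1 ++ [t], s.2.2 ++ [String.ofList (PySem.Chars.strip s.1.1)])
    else ((s.1.1 ++ [ch], c), s.2)
  else ((s.1.1 ++ [ch], s.1.2), s.2)

-- B's body for one document: scan the text, then flush the pending chunk
def pvBDoc (t : String) (text : String) (st : List String × List String) : List String × List String :=
  let r := text.toList.foldl (pvBStep t) ((([] : List Char), (0 : Int)), st)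
  (r.2.1 ++ [t], r.2.2 ++ [String.ofList (PySem.Chars.strip r.1.1)])

def split_documents_into_passages_alt (documents : List (String × List (Option String))) : List (String × List String) :=
  ((documents.find? (fun p => p.1 == "title")).map (·.2)).elim [] (fun titles =>
    ((documents.find? (fun p => p.1 == "text")).map (·.2)).elim [] (fun texts =>
      let st := (titles.zip texts).foldl (fun (acc : List String × List String) tt =>
          tt.2.elim acc (fun text => pvBDoc (tt.1.getD "") text acc))
        (([] : List String), ([] : List String))
      [("passage_title", st.1), ("passage_text", st.2)]))

-- ===== PRECONDITION & SPEC =====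
-- Pre_ excludes exactly the inputs on which A raises KeyError: a missing "title" or "text" key.
def Pre_split_documents_into_passages (documents : List (String × List (Option String))) : Prop :=
  (documents.find? (fun p => p.1 == "title")).isSome = true ∧
  (documents.find? (fun p => p.1 == "text")).isSome = true
instance (documents : List (String × List (Option String))) : Decidable (Pre_split_documents_into_passages documents) := by unfold Pre_split_documents_into_passages; infer_instance
def pvWitness_split_documents_into_passages : (List (String × List (Option String))) :=
  [("title", [some "doc", none]), ("text", [some "a b  c", none])]
def Spec_split_documents_into_passages (documents : List (String × List (Option String))) (out : List (String × List String)) : Prop := out = split_documents_into_passages_alt documents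
instance (documents : List (String × List (Option String))) (out : List (String × List String)) : Decidable (Spec_split_documents_into_passages documents out) := by unfold Spec_split_documents_into_passages; infer_instance

-- ===== CLAIM (what is proved, stated in full; the proofs are below) =====
def Claim_equal_split_documents_into_passages : Prop := ∀ (documents : List (String × List (Option String))), Dom_split_documents_into_passages documents → Pre_split_documents_into_passages documents → Spec_split_documents_into_passages documents (split_documents_into_passages documents)

-- ===== LEMMAS AND PROOFS =====

-- prepend a prefix onto the first piece
def consFst (p : List Char) : List (List Char) → List (List Char)
  | [] => [p]
  | h :: t => (p ++ h) :: t

-- recursive characterisation of text.split(" ")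
def splitSp : List Char → List (List Char)
  | [] => [[]]
  | c :: cs => if c = ' ' then [] :: splitSp cs else consFst [c] (splitSp cs)

theorem splitSp_ne_nil (cs : List Char) : splitSp cs ≠ [] := by
  induction cs with
  | nil => simp [splitSp]
  | cons c cs ih =>
    simp only [splitSp]
    split
    · simp
    · cases h : splitSp cs with
      | nil => exact absurd h ih
      | cons a t => simp [consFst]

theorem consFst_consFst (a b : List Char) (ps : List (List Char)) :
    consFst a (consFst b ps) = consFst (a ++ b) ps := by
  cases ps <;> simp [consFst]

theorem splitOn_go_eq (fuel : Nat) (l cur : List Char) (acc : List (List Char))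
    (h : l.length < fuel) :
    PySem.Chars.splitOn.go [' '] fuel l cur acc = acc.reverse ++ consFst cur.reverse (splitSp l) := by
  induction fuel generalizing l cur acc with
  | zero => omega
  | succ fuel ih =>
    cases l with
    | nil => simp [PySem.Chars.splitOn.go, splitSp, consFst]
    | cons c rest =>
      rw [show PySem.Chars.splitOn.go [' '] (fuel + 1) (c :: rest) cur acc =
          (if [' '].isPrefixOf (c :: rest) then
            PySem.Chars.splitOn.go [' '] fuel (List.drop [' '].length (c :: rest)) [] (cur.reverse :: acc)
          else PySem.Chars.splitOn.go [' '] fuel rest (c :: cur) acc) from rfl]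
      by_cases hc : c = ' '
      · subst hc
        rw [if_pos (by simp [List.isPrefixOf])]
        simp only [List.length_cons, List.length_nil, List.drop_succ_cons, List.drop_zero]
        rw [ih rest [] (cur.reverse :: acc) (by simp at h ⊢; omega)]
        cases hsp : splitSp rest with
        | nil => exact absurd hsp (splitSp_ne_nil rest)
        | cons a t => simp [splitSp, consFst, hsp]
      · rw [if_neg (by simp [List.isPrefixOf, beq_iff_eq]; exact fun h' => hc h'.symm)]
        rw [ih rest (c :: cur) acc (by simp at h ⊢; omega)]
        simp only [splitSp, if_neg hc, List.reverse_cons]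
        rw [consFst_consFst]

theorem splitOn_eq_splitSp (cs : List Char) :
    PySem.Chars.splitOn cs [' '] = splitSp cs := by
  unfold PySem.Chars.splitOn
  rw [splitOn_go_eq (cs.length + 1) cs [] [] (by omega)]
  cases h : splitSp cs with
  | nil => exact absurd h (splitSp_ne_nil cs)
  | cons a t => simp [consFst]

-- A's regrouping, recursively: strip(join(take 100)) :: recurse on drop 100
def chunksA (ps : List (List Char)) : List String :=
  if ps = [] then []
  else String.ofList (PySem.Chars.strip (PySem.Chars.join [' '] (ps.take 100))) :: chunksA (ps.drop 100)
termination_by ps.length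
decreasing_by
  cases ps with
  | nil => simp_all
  | cons a t => simp

theorem pyRange_hundred (L : Nat) :
    PySem.List.pyRange 0 (L : Int) 100 = (List.range ((L + 99) / 100)).map (fun k => ((100 * k : Nat) : Int)) := by
  unfold PySem.List.pyRange
  rw [if_neg (by norm_num)]
  rw [if_pos (by norm_num)]
  by_cases h : 0 < L
  · rw [if_pos (by exact_mod_cast h)]
    rw [show (((L : Int) - 0 + 100 - 1) / 100).toNat = (L + 99) / 100 from by omega]
    push_cast
    simp
  · rw [show L = 0 from by omega]
    rw [if_neg (by norm_num)]
    simp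

theorem chunk_body_eq (ps : List (List Char)) (k : Nat) :
    PySem.List.slice ps (some ((100 * k : Nat) : Int)) (some (((100 * k : Nat) : Int) + 100)) =
      (ps.drop (100 * k)).take 100 := by
  have h := PySem.List.slice_natCast_add ps (100 * k) 100
  simpa using h

def chunkG (ps : List (List Char)) (k : Nat) : String :=
  String.ofList (PySem.Chars.strip (PySem.Chars.join [' '] ((ps.drop (100 * k)).take 100)))

theorem chunkmap_fuel (N : Nat) : ∀ ps : List (List Char), ps.length ≤ N →
    (List.range ((ps.length + 99) / 100)).map (chunkG ps) = chunksA ps := by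
  induction N with
  | zero =>
    intro ps hps
    have hnil : ps = [] := List.length_eq_zero_iff.mp (by omega)
    subst hnil
    simp [chunksA]
  | succ N ih =>
    intro ps hps
    by_cases hnil : ps = []
    · subst hnil
      simp [chunksA]
    · have hL : 0 < ps.length := List.length_pos_iff.mpr hnil
      have hK : (ps.length + 99) / 100 = ((ps.length - 100 + 99) / 100) + 1 := by omega
      rw [hK, List.range_succ_eq_map, List.map_cons, List.map_map]
      have hmap : (List.range ((ps.length - 100 + 99) / 100)).map (chunkG ps ∘ Nat.succ) =
          (List.range (((ps.drop 100).length + 99) / 100)).map (chunkG (ps.drop 100)) := by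
        rw [show (ps.drop 100).length = ps.length - 100 from by simp]
        apply List.map_congr_left
        intro k _
        simp only [Function.comp, chunkG, List.drop_drop]
        rw [show 100 + 100 * k = 100 * (k + 1) from by ring]
      rw [hmap, ih (ps.drop 100) (by simp; omega)]
      conv_rhs => rw [chunksA]
      rw [if_neg hnil]
      simp [chunkG]

theorem chunk_lemma (ps : List (List Char)) :
    (PySem.List.pyRange 0 (ps.length : Int) 100).map (fun i =>
      String.ofList (PySem.Chars.strip (PySem.Chars.join [' ']
        (PySem.List.slice ps (some i) (some (i + 100)))))) = chunksA ps := by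
  rw [pyRange_hundred, List.map_map]
  rw [show ((fun i => String.ofList (PySem.Chars.strip (PySem.Chars.join [' ']
        (PySem.List.slice ps (some i) (some (i + 100)))))) ∘ (fun k : Nat => ((100 * k : Nat) : Int)))
      = chunkG ps from by
    funext k
    simp only [Function.comp, chunkG, chunk_body_eq]]
  exact chunkmap_fuel ps.length ps le_rfl

theorem split_document_text_eq (text : String) :
    split_document_text text 100 " " = chunksA (splitSp text.toList) := by
  unfold split_document_text
  rw [show (" " : String).toList = [' '] from rfl, splitOn_eq_splitSp]
  exact chunk_lemma _

-- B's scan, in recursive form producing the passages of the current document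
def aGen : List Char → List Char → Nat → List String
  | [], cur, _ => [String.ofList (PySem.Chars.strip cur)]
  | c :: cs, cur, r =>
    if c = ' ' then
      if r + 1 = 100 then String.ofList (PySem.Chars.strip cur) :: aGen cs [] 0
      else aGen cs (cur ++ [' ']) (r + 1)
    else aGen cs (cur ++ [c]) r

theorem join_cons_char (c : Char) (p : List Char) (l : List (List Char)) :
    PySem.Chars.join [' '] ((c :: p) :: l) = c :: PySem.Chars.join [' '] (p :: l) := by
  cases l with
  | nil => rw [PySem.Chars.join_singleton, PySem.Chars.join_singleton]
  | cons q rest => rw [PySem.Chars.join_cons_cons, PySem.Chars.join_cons_cons]; simp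

theorem aGen_eq (cs : List Char) : ∀ (cur : List Char) (r : Nat), r < 100 →
    aGen cs cur r =
      String.ofList (PySem.Chars.strip (cur ++ PySem.Chars.join [' '] ((splitSp cs).take (100 - r))))
        :: chunksA ((splitSp cs).drop (100 - r)) := by
  induction cs with
  | nil =>
    intro cur r hr
    simp only [aGen, splitSp]
    rw [List.take_of_length_le (by simp; omega), List.drop_eq_nil_of_le (by simp; omega)]
    rw [PySem.Chars.join_singleton, chunksA]
    simp
  | cons c cs ih =>
    intro cur r hr
    obtain ⟨p0, t, hps⟩ : ∃ p0 t, splitSp cs = p0 :: t := by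
      cases h : splitSp cs with
      | nil => exact absurd h (splitSp_ne_nil cs)
      | cons a b => exact ⟨a, b, rfl⟩
    by_cases hc : c = ' '
    · subst hc
      rw [show splitSp (' ' :: cs) = [] :: splitSp cs from by simp [splitSp]]
      rw [show aGen (' ' :: cs) cur r = (if r + 1 = 100 then
            String.ofList (PySem.Chars.strip cur) :: aGen cs [] 0
          else aGen cs (cur ++ [' ']) (r + 1)) from by simp [aGen]]
      by_cases hr1 : r + 1 = 100
      · rw [if_pos hr1]
        have h100 : 100 - r = 1 := by omega
        rw [h100, ih [] 0 (by omega)]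
        rw [show List.take 1 ([] :: splitSp cs) = [[]] from by simp]
        rw [show List.drop 1 ([] :: splitSp cs) = splitSp cs from rfl]
        rw [PySem.Chars.join_singleton]
        conv_rhs => rw [chunksA]
        rw [if_neg (splitSp_ne_nil cs)]
        simp
      · rw [if_neg hr1]
        rw [ih (cur ++ [' ']) (r + 1) (by omega)]
        rw [hps]
        have h100 : 100 - r = (100 - (r + 1)) + 1 := by omega
        rw [h100, List.take_succ_cons, List.drop_succ_cons]
        have h2 : 100 - (r + 1) = (100 - (r + 1) - 1) + 1 := by omega
        rw [h2, List.take_succ_cons]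
        rw [PySem.Chars.join_cons_cons]
        simp
    · have hcs : splitSp (c :: cs) = (c :: p0) :: t := by
        simp [splitSp, hc, hps, consFst]
      rw [show aGen (c :: cs) cur r = aGen cs (cur ++ [c]) r from by simp [aGen, hc]]
      rw [ih (cur ++ [c]) r hr, hps, hcs]
      have h100 : 100 - r = (100 - r - 1) + 1 := by omega
      rw [h100, List.take_succ_cons, List.take_succ_cons, List.drop_succ_cons, List.drop_succ_cons]
      rw [join_cons_char]
      simp

theorem aGen_zero (cs : List Char) : aGen cs [] 0 = chunksA (splitSp cs) := by
  rw [aGen_eq cs [] 0 (by omega)]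
  conv_rhs => rw [chunksA]
  rw [if_neg (splitSp_ne_nil cs)]
  norm_num

-- B's foldl over the text equals aGen, appended behind the accumulated lists
theorem bdoc_foldl_eq (t : String) (cs : List Char) : ∀ (cur : List Char) (count : Int)
    (st : List String × List String), 0 ≤ count →
    (let r := cs.foldl (pvBStep t) ((cur, count), st)
     (r.2.1 ++ [t], r.2.2 ++ [String.ofList (PySem.Chars.strip r.1.1)])) =
    (st.1 ++ List.replicate (aGen cs cur ((count % 100).toNat)).length t,
     st.2 ++ aGen cs cur ((count % 100).toNat)) := by
  induction cs with
  | nil => intro cur count st h; simp [aGen]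
  | cons ch cs ih =>
    intro cur count st hcount
    simp only [List.foldl_cons]
    by_cases hch : ch = ' '
    · subst hch
      rw [show aGen (' ' :: cs) cur ((count % 100).toNat) = (if (count % 100).toNat + 1 = 100 then
            String.ofList (PySem.Chars.strip cur) :: aGen cs [] 0
          else aGen cs (cur ++ [' ']) ((count % 100).toNat + 1)) from by simp [aGen]]
      have hfm : PySem.Int.mod (count + 1) 100 = (count + 1) % 100 := by
        rw [PySem.Int.mod, Int.fmod_eq_emod]
        simp
      by_cases hz : (count + 1) % 100 = 0
      · have hstep : pvBStep t ((cur, count), st) ' ' =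
            (([], count + 1), st.1 ++ [t], st.2 ++ [String.ofList (PySem.Chars.strip cur)]) := by
          simp [pvBStep, hz]
        rw [hstep, ih [] (count + 1) _ (by omega)]
        rw [if_pos (by omega)]
        rw [show ((count + 1) % 100).toNat = 0 from by omega]
        simp [List.replicate_succ]
      · have hstep : pvBStep t ((cur, count), st) ' ' = ((cur ++ [' '], count + 1), st) := by
          simp [pvBStep, hz]
        rw [hstep, ih (cur ++ [' ']) (count + 1) st (by omega)]
        rw [if_neg (by omega)]
        rw [show ((count + 1) % 100).toNat = (count % 100).toNat + 1 from by omega]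
    · have hstep : pvBStep t ((cur, count), st) ch = ((cur ++ [ch], count), st) := by
        simp [pvBStep, hch]
      rw [hstep, ih (cur ++ [ch]) count st hcount]
      rw [show aGen (ch :: cs) cur ((count % 100).toNat) = aGen cs (cur ++ [ch]) ((count % 100).toNat)
          from by simp [aGen, hch]]

theorem pvBDoc_eq (t : String) (text : String) (st : List String × List String) :
    pvBDoc t text st =
      (st.1 ++ List.replicate (split_document_text text 100 " ").length t,
       st.2 ++ split_document_text text 100 " ") := by
  unfold pvBDoc
  have h := bdoc_foldl_eq t text.toList [] 0 st (by omega)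
  simp only at h
  rw [h]
  norm_num
  rw [aGen_zero, split_document_text_eq]
  exact ⟨rfl, rfl⟩

theorem adoc_foldl_eq (t : String) (P : List String) : ∀ (acc : List String × List String),
    P.foldl (fun acc2 passage => (acc2.1 ++ [t], acc2.2 ++ [passage])) acc =
      (acc.1 ++ List.replicate P.length t, acc.2 ++ P) := by
  induction P with
  | nil => intro acc; simp
  | cons p ps ih =>
    intro acc
    rw [List.foldl_cons, ih]
    simp [List.replicate_succ]

theorem outer_eq (pairs : List (Option String × Option String)) :
    ∀ (acc : List String × List String),
    pairs.foldl (fun (acc : List String × List String) tt =>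
        match tt.2 with
        | none => acc
        | some text => (split_document_text text 100 " ").foldl
            (fun acc2 passage => (acc2.1 ++ [tt.1.getD ""], acc2.2 ++ [passage])) acc) acc =
    pairs.foldl (fun (acc : List String × List String) tt =>
        tt.2.elim acc (fun text => pvBDoc (tt.1.getD "") text acc)) acc := by
  induction pairs with
  | nil => intro acc; rfl
  | cons tt rest ih =>
    intro acc
    rw [List.foldl_cons, List.foldl_cons, ih]
    congr 1
    cases tt.2 with
    | none => rfl
    | some text => exact (adoc_foldl_eq _ _ acc).trans (pvBDoc_eq _ text acc).symm

-- ===== VERDICT (by name: the statement is the Claim_ definition above) =====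
theorem split_documents_into_passages_spec : Claim_equal_split_documents_into_passages := by
  intro documents _ hpre
  obtain ⟨h1, h2⟩ := hpre
  unfold Spec_split_documents_into_passages
  unfold split_documents_into_passages split_documents_into_passages_alt
  cases ht : (documents.find? (fun p => p.1 == "title")) with
  | none => rw [ht] at h1; simp at h1
  | some ptitle =>
    cases hx : (documents.find? (fun p => p.1 == "text")) with
    | none => rw [hx] at h2; simp at h2
    | some ptext =>
      simp only [Option.map_some, Option.elim_some]
      rw [outer_eq]
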